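-- pv_equiv track=rewrite | github.com/nh273/caro-ai | lib/game/tictactoe/helpers.py | get_diag
-- ===== SOURCE A (Python) =====
-- from typing import List, Tuple
--
-- Matrix = List[List[int]]
--
-- Coord = Tuple[int, int]
--
-- def get_diag(matrix: Matrix, coord: Coord) -> List[int]:
--     """[summary]
--
--     _|0|1|2|3|
--     0|_|_|_|_|
--     1|_|_|_|_|
--     2|_|_|_|_|
--     3|_|_|_|_|
--
--     Args:
--         matrix (Matrix): [description]
--         coord (Coord): [description]
--
--     Returns:
--         List[int]: [description]
--     """
--     row_idx = coord[0]
--     col_idx = coord[1]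
--
--     if row_idx >= col_idx:
--         # These values are true for the main diagonal
--         # (top-left to bottom-right through board center)
--         # and other smaller diagonals below it
--         # These diagonals always contain the first col
--         col_start = 0
--         row_start = row_idx - col_idx
--         # These diagonals always contain the last row
--         row_end = len(matrix) - 1
--         # Due to symmetry.
--         # Draw and observe the row where the diagonal ends
--         # is the inverted index of the column where it begins
--         col_end = row_end - col_start
--     else:
--         # Diagonals above the main always contain the first row
--         row_start = 0
--         col_start = col_idx - row_idx
--         # and the last column
--         col_end = len(matrix) - 1
--         row_end = col_end - col_start
--
--     diag = []
--     x = row_start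
--     y = col_start
--     while x <= row_end and y <= col_end:
--         diag.append(matrix[x][y])
--         x += 1
--         y += 1
--     return diag
-- ===== SOURCE B (Python) =====
-- def get_diag(matrix, coord):
--     d = coord[0] - coord[1]
--     n = len(matrix)
--     return [matrix[i][i - d] for i in range(n) if 0 <= i - d < n]
-- ===== Notes on version B (the rewrite author's own statement) =====
-- stated objective: simpler
-- what changed: B drops A's row>=col / row<col branch and the dual-counter while loop over computed start/end endpoints: it computes the single offset d = row - col once and collects matrix[i][i-d] for i in range(len(matrix)) whenever 0 <= i-d < len(matrix), a single comprehension with an index condition.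
import Mathlib
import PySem

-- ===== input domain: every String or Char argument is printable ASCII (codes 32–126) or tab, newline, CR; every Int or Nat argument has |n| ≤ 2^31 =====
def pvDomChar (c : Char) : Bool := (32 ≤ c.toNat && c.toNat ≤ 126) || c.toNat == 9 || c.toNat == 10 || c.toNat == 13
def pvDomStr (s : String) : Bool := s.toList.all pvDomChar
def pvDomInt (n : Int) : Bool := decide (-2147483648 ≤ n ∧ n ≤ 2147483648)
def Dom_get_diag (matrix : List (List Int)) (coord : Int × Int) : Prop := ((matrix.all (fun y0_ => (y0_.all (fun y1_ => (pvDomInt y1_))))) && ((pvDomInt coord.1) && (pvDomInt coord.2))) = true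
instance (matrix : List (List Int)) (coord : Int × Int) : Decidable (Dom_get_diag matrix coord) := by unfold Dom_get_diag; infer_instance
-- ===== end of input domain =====

-- B replaces A's row>=col / row<col branch and dual-counter walk from computed start/end
-- endpoints by a single comprehension over row indices with the offset condition 0 <= i-d < n
-- (objective: simpler). Return values agree on all inputs where A returns (Pre_ excludes
-- exactly A's IndexError inputs, on which B raises the same error).

-- ===== PORT A =====
-- the while loop of A: x, y step together while x <= row_end and y <= col_end;
-- pyGet? none = Python IndexError (excluded by Pre_; the port then stops with acc)
def pvALoop (matrix : List (List Int)) (rowEnd colEnd : Int) (x y : Int) (acc : List Int) : List Int :=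
  if _h : x ≤ rowEnd ∧ y ≤ colEnd then
    match PySem.List.pyGet? matrix x with
    | none => acc
    | some row =>
      match PySem.List.pyGet? row y with
      | none => acc
      | some v => pvALoop matrix rowEnd colEnd (x + 1) (y + 1) (acc ++ [v])
  else acc
termination_by (rowEnd + 1 - x).toNat
decreasing_by omega

def get_diag (matrix : List (List Int)) (coord : Int × Int) : List Int :=
  let row_idx := coord.1
  let col_idx := coord.2
  let p : Int × Int × Int × Int :=
    if row_idx ≥ col_idx then
      let col_start : Int := 0
      let row_start := row_idx - col_idx
      let row_end : Int := (matrix.length : Int) - 1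
      let col_end := row_end - col_start
      (row_start, col_start, row_end, col_end)
    else
      let row_start : Int := 0
      let col_start := col_idx - row_idx
      let col_end : Int := (matrix.length : Int) - 1
      let row_end := col_end - col_start
      (row_start, col_start, row_end, col_end)
  pvALoop matrix p.2.2.1 p.2.2.2 p.1 p.2.1 []

-- ===== PORT B =====
-- the comprehension of Source B: [matrix[i][i-d] for i in range(n) if 0 <= i-d < n];
-- pyGetD is exact here because Pre_ guarantees every selected cell is in range
def pvBStep (matrix : List (List Int)) (d : Int) (acc : List Int) (i : Int) : List Int :=
  if 0 ≤ i - d ∧ i - d < (matrix.length : Int) then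
    acc ++ [PySem.List.pyGetD (PySem.List.pyGetD matrix i []) (i - d) 0]
  else acc

def get_diag_alt (matrix : List (List Int)) (coord : Int × Int) : List Int :=
  let d := coord.1 - coord.2
  let n : Int := matrix.length
  (PySem.List.pyRange 0 n 1).foldl (pvBStep matrix d) []

-- ===== PRECONDITION & SPEC =====
-- Pre_ excludes exactly the inputs on which A raises IndexError (a ragged matrix whose row i
-- is too short to hold the diagonal cell i-d that the loop reaches); B raises there too.
def Pre_get_diag (matrix : List (List Int)) (coord : Int × Int) : Prop :=
  ∀ i < matrix.length,
    (0 ≤ (i : Int) - (coord.1 - coord.2) ∧ (i : Int) - (coord.1 - coord.2) < (matrix.length : Int)) →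
      (i : Int) - (coord.1 - coord.2) < ((matrix.getD i []).length : Int)
instance (matrix : List (List Int)) (coord : Int × Int) : Decidable (Pre_get_diag matrix coord) := by
  unfold Pre_get_diag; infer_instance

def pvWitness_get_diag : List (List Int) × (Int × Int) := ([[1, 2], [3, 4]], (1, 0))

def Spec_get_diag (matrix : List (List Int)) (coord : Int × Int) (out : List Int) : Prop := out = get_diag_alt matrix coord
instance (matrix : List (List Int)) (coord : Int × Int) (out : List Int) : Decidable (Spec_get_diag matrix coord out) := by unfold Spec_get_diag; infer_instance

-- ===== CLAIM (what is proved, stated in full; the proofs are below) =====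
def Claim_equal_get_diag : Prop := ∀ (matrix : List (List Int)) (coord : Int × Int), Dom_get_diag matrix coord → Pre_get_diag matrix coord → Spec_get_diag matrix coord (get_diag matrix coord)

-- ===== LEMMAS AND PROOFS =====

-- A's loop, from any x with y = x - d, equals B's fold over the remaining index range,
-- given that the loop guard is the interval bound x < stop and all reached cells are in range.
theorem pvALoop_eq_foldl (matrix : List (List Int)) (d rowEnd colEnd stop x0 : Int)
    (hg : ∀ z : Int, (z ≤ rowEnd ∧ z - d ≤ colEnd) ↔ z < stop)
    (hstop : stop ≤ (matrix.length : Int))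
    (hc : ∀ z : Int, x0 ≤ z → z < stop → 0 ≤ z - d ∧ z - d < (matrix.length : Int))
    (hPre : ∀ i < matrix.length, 0 ≤ (i : Int) - d → (i : Int) - d < (matrix.length : Int) →
      (i : Int) - d < ((matrix.getD i []).length : Int)) :
    ∀ x acc, x0 ≤ x → 0 ≤ x →
      pvALoop matrix rowEnd colEnd x (x - d) acc
        = (PySem.List.pyRange x stop 1).foldl (pvBStep matrix d) acc := by
  intro x acc hx0 hx
  by_cases hlt : x < stop
  · have hxn : x < (matrix.length : Int) := lt_of_lt_of_le hlt hstop
    have hcell := hc x hx0 hlt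
    have hrow : PySem.List.pyGet? matrix x = some matrix[x.toNat] :=
      PySem.List.pyGet?_eq_some_getElem matrix hx hxn
    have hiNat : x.toNat < matrix.length := by omega
    have hxt : ((x.toNat : Int)) = x := Int.toNat_of_nonneg hx
    have hgetD : matrix.getD x.toNat [] = matrix[x.toNat] := List.getD_eq_getElem matrix [] hiNat
    have hlen : x - d < ((matrix[x.toNat] : List Int).length : Int) := by
      have h := hPre x.toNat hiNat (by rw [hxt]; exact hcell.1) (by rw [hxt]; exact hcell.2)
      rw [hxt, hgetD] at h
      exact h
    have hval : PySem.List.pyGet? (matrix[x.toNat] : List Int) (x - d)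
        = some (matrix[x.toNat] : List Int)[(x - d).toNat] :=
      PySem.List.pyGet?_eq_some_getElem _ hcell.1 hlen
    rw [pvALoop, dif_pos ((hg x).mpr hlt)]
    simp only [hrow, hval]
    rw [PySem.List.pyRange_one_cons hlt, List.foldl_cons]
    have hstep : pvBStep matrix d acc x = acc ++ [(matrix[x.toNat] : List Int)[(x - d).toNat]] := by
      rw [pvBStep, if_pos hcell,
        PySem.List.pyGetD_eq_getElem matrix [] hx hxn,
        PySem.List.pyGetD_eq_getElem _ 0 hcell.1 hlen]
    rw [hstep]
    have hrec := pvALoop_eq_foldl matrix d rowEnd colEnd stop x0 hg hstop hc hPre (x + 1)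
      (acc ++ [(matrix[x.toNat] : List Int)[(x - d).toNat]]) (by omega) (by omega)
    have harg : x - d + 1 = x + 1 - d := by ring
    rw [harg]
    exact hrec
  · rw [pvALoop, dif_neg (by rw [hg]; exact hlt),
      PySem.List.pyRange_one_eq_nil (by omega), List.foldl_nil]
termination_by x => (stop - x).toNat
decreasing_by omega

-- B's fold does nothing on an index range on which the condition 0 <= i-d < n fails
theorem pvBStep_skip (matrix : List (List Int)) (d : Int) :
    ∀ a b acc, (∀ i : Int, a ≤ i → i < b → ¬(0 ≤ i - d ∧ i - d < (matrix.length : Int))) →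
      (PySem.List.pyRange a b 1).foldl (pvBStep matrix d) acc = acc := by
  intro a b acc hskip
  by_cases hab : a < b
  · rw [PySem.List.pyRange_one_cons hab, List.foldl_cons, pvBStep,
      if_neg (hskip a le_rfl hab)]
    exact pvBStep_skip matrix d (a + 1) b acc (fun i h1 h2 => hskip i (by omega) h2)
  · rw [PySem.List.pyRange_one_eq_nil (by omega), List.foldl_nil]
termination_by a b => (b - a).toNat
decreasing_by omega

-- ===== VERDICT (by name: the statement is the Claim_ definition above) =====
theorem get_diag_spec : Claim_equal_get_diag := by
  intro matrix coord _hDom hPre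
  unfold Spec_get_diag get_diag get_diag_alt
  have hn0 : (0 : Int) ≤ (matrix.length : Int) := by positivity
  have hPre' : ∀ i < matrix.length,
      0 ≤ (i : Int) - (coord.1 - coord.2) →
      (i : Int) - (coord.1 - coord.2) < (matrix.length : Int) →
      (i : Int) - (coord.1 - coord.2) < ((matrix.getD i []).length : Int) :=
    fun i hi h1 h2 => hPre i hi ⟨h1, h2⟩
  by_cases hcase : coord.1 ≥ coord.2
  · -- d ≥ 0: A walks x from d with y = x - d while x ≤ n-1 and y ≤ n-1, i.e. x < n
    simp only [ge_iff_le, if_pos hcase]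
    have hA := pvALoop_eq_foldl matrix (coord.1 - coord.2)
      ((matrix.length : Int) - 1) ((matrix.length : Int) - 1 - 0) (matrix.length : Int)
      (coord.1 - coord.2)
      (by intro z; omega) (by omega) (by intro z h1 h2; omega) hPre'
      (coord.1 - coord.2) [] le_rfl (by omega)
    rw [show coord.1 - coord.2 - (coord.1 - coord.2) = (0 : Int) from sub_self _] at hA
    rw [hA]
    -- B: split [0, n) at min d n; the prefix [0, min d n) is skipped by the condition
    rw [PySem.List.pyRange_one_append 0 (min (coord.1 - coord.2) (matrix.length : Int))
      (matrix.length : Int) (by omega) (by omega),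
      List.foldl_append,
      pvBStep_skip matrix (coord.1 - coord.2) 0
        (min (coord.1 - coord.2) (matrix.length : Int)) [] (by intro i h1 h2; omega)]
    by_cases hdn : coord.1 - coord.2 ≤ (matrix.length : Int)
    · rw [min_eq_left hdn]
    · rw [PySem.List.pyRange_one_eq_nil (by omega),
        PySem.List.pyRange_one_eq_nil (by omega)]
  · -- d < 0: A walks x from 0 with y = x - d while x ≤ n-1+d and y ≤ n-1, i.e. x < n+d
    simp only [ge_iff_le, if_neg hcase]
    have hA := pvALoop_eq_foldl matrix (coord.1 - coord.2)
      ((matrix.length : Int) - 1 - (coord.2 - coord.1)) ((matrix.length : Int) - 1)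
      ((matrix.length : Int) + (coord.1 - coord.2)) 0
      (by intro z; constructor <;> (intro h; omega)) (by omega)
      (by intro z h1 h2; omega) hPre' 0 [] le_rfl le_rfl
    rw [show (0 : Int) - (coord.1 - coord.2) = coord.2 - coord.1 from by ring] at hA
    rw [hA]
    -- B: split [0, n) at max (n+d) 0; the tail [max (n+d) 0, n) is skipped
    rw [PySem.List.pyRange_one_append 0
      (max ((matrix.length : Int) + (coord.1 - coord.2)) 0) (matrix.length : Int)
      (by omega) (by omega),
      List.foldl_append,
      pvBStep_skip matrix (coord.1 - coord.2)
        (max ((matrix.length : Int) + (coord.1 - coord.2)) 0) (matrix.length : Int)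
        _ (by intro i h1 h2; omega)]
    by_cases hnd : (0 : Int) ≤ (matrix.length : Int) + (coord.1 - coord.2)
    · rw [max_eq_left hnd]
    · rw [PySem.List.pyRange_one_eq_nil (by omega),
        PySem.List.pyRange_one_eq_nil (by omega)]
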